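-- pv_equiv track=rewrite | github.com/xlsama/chronos-v3 | server/src/ops_agent/tools/tool_permissions.py | _strip_timeout_wrapper
-- ===== SOURCE A (Python) =====
-- def _strip_timeout_wrapper(cmd: str) -> str:
--     """Strip a leading `timeout <duration>` wrapper for read/write classification."""
--     text = cmd.strip()
--     while text.startswith("timeout "):
--         parts = text.split(None, 2)
--         if len(parts) < 3:
--             return text
--         text = parts[2].strip()
--     return text
-- ===== SOURCE B (Python) =====
-- def _strip_timeout_wrapper(cmd: str) -> str:
--     """Strip leading `timeout <duration>` wrappers with a single index scan:
--     instead of repeatedly splitting and rebuilding strings, advance a cut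
--     position past each wrapper and slice once at the end."""
--     s = cmd.strip()
--     n = len(s)
--     i = 0
--     while s.startswith("timeout ", i):
--         j = i + 8
--         while j < n and s[j].isspace():      # whitespace before the duration
--             j += 1
--         while j < n and not s[j].isspace():  # the duration token
--             j += 1
--         k = j
--         while k < n and s[k].isspace():      # separator before the real command
--             k += 1
--         if k == n:                           # no third token: keep the wrapper
--             break
--         i = k
--     return s[i:]
-- ===== Notes on version B (the rewrite author's own statement) =====
-- stated objective: alternative
-- what changed: B replaces A's repeated split(None,2)-and-rebuild loop by a single index scan over the stripped string that advances a cut position past each wrapper and slices once at the end, so no intermediate strings are built.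
import Mathlib
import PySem

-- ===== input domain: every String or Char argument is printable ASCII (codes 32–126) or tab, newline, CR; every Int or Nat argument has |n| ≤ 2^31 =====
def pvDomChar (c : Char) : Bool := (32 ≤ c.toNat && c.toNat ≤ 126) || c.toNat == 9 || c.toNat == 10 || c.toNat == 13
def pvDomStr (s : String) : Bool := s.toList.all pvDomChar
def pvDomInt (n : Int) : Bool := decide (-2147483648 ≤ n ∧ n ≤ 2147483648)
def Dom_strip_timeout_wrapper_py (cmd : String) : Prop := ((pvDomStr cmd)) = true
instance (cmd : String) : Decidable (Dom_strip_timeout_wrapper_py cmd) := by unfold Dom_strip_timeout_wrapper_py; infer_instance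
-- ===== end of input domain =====

-- B replaces A's repeated split(None,2)-and-rebuild loop by a single index scan that
-- finds the cut position and slices once (alternative decomposition; linear instead of
-- quadratic string rebuilding on deeply nested wrappers).

-- ===== PORT A =====
-- while text.startswith("timeout "): parts = text.split(None, 2); if len(parts) < 3: return text; text = parts[2].strip()
-- (fuel = length of the loop's string + 1 is a totality guard only: each iteration strictly shortens text)
def stripA_loop (fuel : Nat) (text : List Char) : List Char :=
  match fuel with
  | 0 => text
  | fuel + 1 =>
    if PySem.Chars.startswith text "timeout ".toList then
      let parts := PySem.Chars.split₀Max text 2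
      if parts.length < 3 then text
      else stripA_loop fuel (PySem.Chars.strip (PySem.List.pyGetD parts 2 []))
    else text

def strip_timeout_wrapper_py (cmd : String) : String :=
  let text := PySem.Chars.strip cmd.toList
  String.ofList (stripA_loop (text.length + 1) text)

-- ===== PORT B =====
-- while j < n and p(s[j]): j += 1   (fuel is a totality guard; n = cs.length in every call)
def pvScan (p : Char → Bool) (cs : List Char) (fuel j : Nat) : Nat :=
  match fuel with
  | 0 => j
  | fuel + 1 => if j < cs.length && p (cs.getD j ' ') then pvScan p cs fuel (j + 1) else j

-- while s.startswith("timeout ", i): skip whitespace, the duration token, whitespace; break if at end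
def altLoop (cs : List Char) (fuel i : Nat) : Nat :=
  match fuel with
  | 0 => i
  | fuel + 1 =>
    if PySem.Chars.startswith (cs.drop i) "timeout ".toList then
      let j := pvScan PySem.Chars.isspace cs cs.length (i + 8)
      let j2 := pvScan (fun c => !PySem.Chars.isspace c) cs cs.length j
      let k := pvScan PySem.Chars.isspace cs cs.length j2
      if k = cs.length then i else altLoop cs fuel k
    else i

def strip_timeout_wrapper_py_alt (cmd : String) : String :=
  let s := PySem.Chars.strip cmd.toList
  String.ofList (s.drop (altLoop s (s.length + 1) 0))

-- ===== PRECONDITION & SPEC =====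
def Spec_strip_timeout_wrapper_py (cmd : String) (out : String) : Prop := out = strip_timeout_wrapper_py_alt cmd
instance (cmd : String) (out : String) : Decidable (Spec_strip_timeout_wrapper_py cmd out) := by unfold Spec_strip_timeout_wrapper_py; infer_instance

-- ===== CLAIM (what is proved, stated in full; the proofs are below) =====
def Claim_equal_strip_timeout_wrapper_py : Prop := ∀ (cmd : String), Dom_strip_timeout_wrapper_py cmd → Spec_strip_timeout_wrapper_py cmd (strip_timeout_wrapper_py cmd)

-- ===== LEMMAS AND PROOFS =====

theorem wsLit : PySem.Chars.isspace 't' = false ∧ PySem.Chars.isspace 'i' = false ∧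
    PySem.Chars.isspace 'm' = false ∧ PySem.Chars.isspace 'e' = false ∧
    PySem.Chars.isspace 'o' = false ∧ PySem.Chars.isspace 'u' = false ∧
    PySem.Chars.isspace ' ' = true := by decide

theorem timeoutLit : "timeout ".toList = ['t','i','m','e','o','u','t',' '] := by decide

theorem drop_len_takeWhile (p : Char → Bool) (l : List Char) :
    l.drop (l.takeWhile p).length = l.dropWhile p := by
  induction l with
  | nil => simp
  | cons a t ih => by_cases h : p a <;> simp [h, ih]

theorem pvScan_spec (p : Char → Bool) (cs : List Char) (fuel : Nat) :
    ∀ j : Nat, cs.length ≤ j + fuel →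
      pvScan p cs fuel j = j + ((cs.drop j).takeWhile p).length := by
  induction fuel with
  | zero =>
    intro j hj
    have hd : cs.drop j = [] := List.drop_eq_nil_of_le (by omega)
    simp [pvScan, hd]
  | succ fuel ih =>
    intro j hj
    rw [show pvScan p cs (fuel + 1) j
        = if j < cs.length && p (cs.getD j ' ') then pvScan p cs fuel (j + 1) else j from rfl]
    by_cases hjl : j < cs.length
    · have hget : cs.getD j ' ' = cs[j] := List.getD_eq_getElem cs ' ' hjl
      have hd : cs.drop j = cs[j] :: cs.drop (j + 1) := List.drop_eq_getElem_cons hjl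
      rw [hget, hd]
      cases hp : p cs[j] with
      | true =>
        simp only [hjl, decide_true, Bool.and_self, if_true]
        rw [ih (j + 1) (by omega)]
        simp only [List.takeWhile_cons, hp, if_true, List.length_cons]
        omega
      | false =>
        simp [hjl, hp]
    · have hd : cs.drop j = [] := List.drop_eq_nil_of_le (by omega)
      simp [hjl, hd]

theorem pvScan_drop (p : Char → Bool) (cs : List Char) (j : Nat) :
    cs.drop (pvScan p cs cs.length j) = (cs.drop j).dropWhile p := by
  rw [pvScan_spec p cs cs.length j (by omega), ← List.drop_drop, drop_len_takeWhile]

theorem pvScan_ge (p : Char → Bool) (cs : List Char) (j : Nat) :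
    j ≤ pvScan p cs cs.length j := by
  rw [pvScan_spec p cs cs.length j (by omega)]; omega

theorem pvScan_le (p : Char → Bool) (cs : List Char) (j : Nat) (hj : j ≤ cs.length) :
    pvScan p cs cs.length j ≤ cs.length := by
  rw [pvScan_spec p cs cs.length j (by omega)]
  have h1 : ((cs.drop j).takeWhile p).length ≤ (cs.drop j).length :=
    (List.takeWhile_sublist p).length_le
  have h2 : (cs.drop j).length = cs.length - j := List.length_drop
  omega

-- one unfolding of split₀Max.go at positive maxsplit / at maxsplit 0
theorem go_succ (fuel m : Nat) (l : List Char) (acc : List (List Char)) :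
    PySem.Chars.split₀Max.go (fuel + 1) (m + 1) l acc =
      (match List.dropWhile PySem.Chars.isspace l with
       | [] => acc.reverse
       | l' => PySem.Chars.split₀Max.go fuel m
            (List.dropWhile (fun c => !PySem.Chars.isspace c) l')
            (List.takeWhile (fun c => !PySem.Chars.isspace c) l' :: acc)) := rfl

theorem go_zero (fuel : Nat) (l : List Char) (acc : List (List Char)) :
    PySem.Chars.split₀Max.go (fuel + 1) 0 l acc =
      (match List.dropWhile PySem.Chars.isspace l with
       | [] => acc.reverse
       | l' => (l' :: acc).reverse) := rfl

-- text.split(None, 2) for text = "timeout " ++ tail, in closed form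
theorem split2_eq (tail : List Char) :
    PySem.Chars.split₀Max ('t'::'i'::'m'::'e'::'o'::'u'::'t'::' '::tail) 2 =
      (if tail.dropWhile PySem.Chars.isspace = [] then [['t','i','m','e','o','u','t']]
       else if ((tail.dropWhile PySem.Chars.isspace).dropWhile
              (fun c => !PySem.Chars.isspace c)).dropWhile PySem.Chars.isspace = [] then
         [['t','i','m','e','o','u','t'],
          (tail.dropWhile PySem.Chars.isspace).takeWhile (fun c => !PySem.Chars.isspace c)]
       else
         [['t','i','m','e','o','u','t'],
          (tail.dropWhile PySem.Chars.isspace).takeWhile (fun c => !PySem.Chars.isspace c),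
          ((tail.dropWhile PySem.Chars.isspace).dropWhile
              (fun c => !PySem.Chars.isspace c)).dropWhile PySem.Chars.isspace]) := by
  obtain ⟨h1, h2, h3, h4, h5, h6, h7⟩ := wsLit
  have hlen : ('t'::'i'::'m'::'e'::'o'::'u'::'t'::' '::tail).length + 1 = (tail.length + 8) + 1 := by
    simp
  rw [show PySem.Chars.split₀Max ('t'::'i'::'m'::'e'::'o'::'u'::'t'::' '::tail) 2
      = PySem.Chars.split₀Max.go (('t'::'i'::'m'::'e'::'o'::'u'::'t'::' '::tail).length + 1) 2
          ('t'::'i'::'m'::'e'::'o'::'u'::'t'::' '::tail) [] from by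
    simp [PySem.Chars.split₀Max]]
  rw [hlen, show (2 : Nat) = 1 + 1 from rfl, go_succ]
  simp only [List.dropWhile_cons, h1, Bool.false_eq_true, if_false, List.takeWhile_cons,
    h2, h3, h4, h5, h6, h7, Bool.not_false, Bool.not_true, if_true]
  have h8 : tail.length + 8 = (tail.length + 7) + 1 := by omega
  rw [h8, go_succ]
  simp only [List.dropWhile_cons, h7, if_true]
  rcases hu : tail.dropWhile PySem.Chars.isspace with _ | ⟨a, u'⟩
  · simp
  · simp only []
    have h7' : tail.length + 7 = (tail.length + 6) + 1 := by omega
    rw [h7', go_zero]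
    rcases hv : ((a::u').dropWhile (fun c => !PySem.Chars.isspace c)).dropWhile PySem.Chars.isspace
        with _ | ⟨b, v'⟩
    · simp
    · simp

theorem dropWhile_take (p : Char → Bool) (l : List Char) (h : l.dropWhile p = l) (m : Nat) :
    (l.take m).dropWhile p = l.take m := by
  cases l with
  | nil => simp
  | cons a t =>
    have hp : p a = false := by
      by_contra hpa
      have hpa' : p a = true := by revert hpa; cases p a <;> simp
      rw [List.dropWhile_cons, hpa'] at h
      have := (List.dropWhile_sublist (l := t) p).length_le
      have hlen := congrArg List.length h
      simp at hlen
      omega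
    cases m with
    | zero => simp
    | succ m => simp [hp]

theorem rstrip_drop (cs : List Char) (hr : PySem.Chars.rstrip cs = cs) (k : Nat) :
    PySem.Chars.rstrip (cs.drop k) = cs.drop k := by
  have hrev : cs.reverse.dropWhile PySem.Chars.isspace = cs.reverse := by
    have := congrArg List.reverse hr
    simpa [PySem.Chars.rstrip] using this
  simp only [PySem.Chars.rstrip, List.reverse_drop]
  rw [dropWhile_take _ _ hrev, ← List.reverse_drop, List.reverse_reverse]

theorem rstrip_strip (x : List Char) :
    PySem.Chars.rstrip (PySem.Chars.strip x) = PySem.Chars.strip x := by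
  simp [PySem.Chars.strip, PySem.Chars.rstrip, List.reverse_reverse, List.dropWhile_idempotent]

theorem loop_eq (fuel : Nat) : ∀ (cs : List Char) (i : Nat),
    PySem.Chars.rstrip cs = cs → i ≤ cs.length → cs.length - i < fuel →
    stripA_loop fuel (cs.drop i) = cs.drop (altLoop cs fuel i) := by
  induction fuel with
  | zero => intro cs i _ _ h; omega
  | succ fuel ih =>
    intro cs i hr hi hf
    by_cases hsw : PySem.Chars.startswith (cs.drop i) "timeout ".toList = true
    case neg =>
      rw [show stripA_loop (fuel + 1) (cs.drop i)
          = if PySem.Chars.startswith (cs.drop i) "timeout ".toList then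
              (if (PySem.Chars.split₀Max (cs.drop i) 2).length < 3 then cs.drop i
               else stripA_loop fuel (PySem.Chars.strip
                 (PySem.List.pyGetD (PySem.Chars.split₀Max (cs.drop i) 2) 2 [])))
            else cs.drop i from rfl]
      rw [show altLoop cs (fuel + 1) i
          = if PySem.Chars.startswith (cs.drop i) "timeout ".toList then
              (if pvScan PySem.Chars.isspace cs cs.length
                    (pvScan (fun c => !PySem.Chars.isspace c) cs cs.length
                      (pvScan PySem.Chars.isspace cs cs.length (i + 8))) = cs.length then i
               else altLoop cs fuel
                 (pvScan PySem.Chars.isspace cs cs.length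
                    (pvScan (fun c => !PySem.Chars.isspace c) cs cs.length
                      (pvScan PySem.Chars.isspace cs cs.length (i + 8)))))
            else i from rfl]
      rw [timeoutLit] at hsw
      simp [hsw]
    case pos =>
      have hpre : "timeout ".toList <+: cs.drop i := (PySem.Chars.startswith_iff _ _).mp hsw
      obtain ⟨t, ht⟩ := hpre
      have h8 : 8 ≤ cs.length - i := by
        have := congrArg List.length ht
        simp [timeoutLit] at this
        omega
      have htail : cs.drop i = 't'::'i'::'m'::'e'::'o'::'u'::'t'::' ':: cs.drop (i + 8) := by
        have hdl : ("timeout ".toList ++ t).drop 8 = t := by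
          rw [show (8 : Nat) = "timeout ".toList.length from by decide]
          exact List.drop_left
        rw [ht, List.drop_drop] at hdl
        rw [← ht, hdl.symm, timeoutLit]; rfl
      -- B's three scans, as suffix operations
      set j := pvScan PySem.Chars.isspace cs cs.length (i + 8) with hjdef
      set j2 := pvScan (fun c => !PySem.Chars.isspace c) cs cs.length j with hj2def
      set k := pvScan PySem.Chars.isspace cs cs.length j2 with hkdef
      have hdj : cs.drop j = (cs.drop (i + 8)).dropWhile PySem.Chars.isspace := pvScan_drop _ _ _
      have hdj2 : cs.drop j2 = (cs.drop j).dropWhile (fun c => !PySem.Chars.isspace c) :=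
        pvScan_drop _ _ _
      have hdk : cs.drop k = (cs.drop j2).dropWhile PySem.Chars.isspace := pvScan_drop _ _ _
      have hjge : i + 8 ≤ j := pvScan_ge _ _ _
      have hj2ge : j ≤ j2 := pvScan_ge _ _ _
      have hkge : j2 ≤ k := pvScan_ge _ _ _
      have hjle : j ≤ cs.length := pvScan_le _ _ _ (by omega)
      have hj2le : j2 ≤ cs.length := pvScan_le _ _ _ hjle
      have hkle : k ≤ cs.length := pvScan_le _ _ _ hj2le
      rw [show stripA_loop (fuel + 1) (cs.drop i)
          = if PySem.Chars.startswith (cs.drop i) "timeout ".toList then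
              (if (PySem.Chars.split₀Max (cs.drop i) 2).length < 3 then cs.drop i
               else stripA_loop fuel (PySem.Chars.strip
                 (PySem.List.pyGetD (PySem.Chars.split₀Max (cs.drop i) 2) 2 [])))
            else cs.drop i from rfl]
      rw [show altLoop cs (fuel + 1) i
          = if PySem.Chars.startswith (cs.drop i) "timeout ".toList then
              (if k = cs.length then i else altLoop cs fuel k)
            else i from rfl]
      have hswl : PySem.Chars.startswith (cs.drop i) ['t','i','m','e','o','u','t',' '] = true := by
        rw [← timeoutLit]; exact hsw
      simp only [hsw, if_true]
      rw [show PySem.Chars.split₀Max (cs.drop i) 2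
          = PySem.Chars.split₀Max ('t'::'i'::'m'::'e'::'o'::'u'::'t'::' ':: cs.drop (i + 8)) 2
          from by rw [← htail], split2_eq]
      by_cases hu : (cs.drop (i + 8)).dropWhile PySem.Chars.isspace = []
      · -- no duration token at all: both sides keep the wrapper
        have hj2e : cs.drop j2 = [] := by rw [hdj2, hdj, hu]; rfl
        have hke : cs.drop k = [] := by rw [hdk, hj2e]; rfl
        have hkn : k = cs.length := by
          have := List.drop_eq_nil_iff.mp hke
          omega
        simp [hu, hkn]
      · by_cases hv : (((cs.drop (i + 8)).dropWhile PySem.Chars.isspace).dropWhile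
            (fun c => !PySem.Chars.isspace c)).dropWhile PySem.Chars.isspace = []
        · -- duration token runs to the end: both sides keep the wrapper
          have hke : cs.drop k = [] := by rw [hdk, hdj2, hdj]; exact hv
          have hkn : k = cs.length := by
            have := List.drop_eq_nil_iff.mp hke
            omega
          simp [hu, hv, hkn]
        · -- a third token exists: both sides strip one wrapper and continue
          have hkv : cs.drop k = (((cs.drop (i + 8)).dropWhile PySem.Chars.isspace).dropWhile
              (fun c => !PySem.Chars.isspace c)).dropWhile PySem.Chars.isspace := by
            rw [hdk, hdj2, hdj]
          have hkn : k ≠ cs.length := by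
            intro he
            apply hv
            rw [← hkv, he, List.drop_length]
          simp only [hu, hv, if_false, hkn]
          have hget : PySem.List.pyGetD
              [['t','i','m','e','o','u','t'],
               ((cs.drop (i + 8)).dropWhile PySem.Chars.isspace).takeWhile
                 (fun c => !PySem.Chars.isspace c),
               (((cs.drop (i + 8)).dropWhile PySem.Chars.isspace).dropWhile
                 (fun c => !PySem.Chars.isspace c)).dropWhile PySem.Chars.isspace] 2 []
              = (((cs.drop (i + 8)).dropWhile PySem.Chars.isspace).dropWhile
                 (fun c => !PySem.Chars.isspace c)).dropWhile PySem.Chars.isspace := by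
            simp [PySem.List.pyGetD, PySem.List.pyGet?, PySem.List.pyIdx?]
          rw [if_neg (by simp), hget]
          have hstrip : PySem.Chars.strip ((((cs.drop (i + 8)).dropWhile
              PySem.Chars.isspace).dropWhile (fun c => !PySem.Chars.isspace c)).dropWhile
              PySem.Chars.isspace) = cs.drop k := by
            rw [← hkv]
            have hl : PySem.Chars.lstrip (cs.drop k) = cs.drop k := by
              rw [hkv]
              simp [PySem.Chars.lstrip, List.dropWhile_idempotent]
            rw [PySem.Chars.strip, hl]
            exact rstrip_drop cs hr k
          rw [hstrip]
          exact ih cs k hr hkle (by omega)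

-- ===== VERDICT (by name: the statement is the Claim_ definition above) =====
theorem strip_timeout_wrapper_py_spec : Claim_equal_strip_timeout_wrapper_py := by
  intro cmd _
  unfold Spec_strip_timeout_wrapper_py strip_timeout_wrapper_py strip_timeout_wrapper_py_alt
  have h := loop_eq ((PySem.Chars.strip cmd.toList).length + 1) (PySem.Chars.strip cmd.toList) 0
    (rstrip_strip cmd.toList) (by omega) (by omega)
  simp only [List.drop_zero] at h
  exact congrArg String.ofList h
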